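-- pv_equiv track=rewrite | github.com/Sheriffy4/recon | core/analysis/advanced_analyzer.py | generate_fix_recommendations
-- ===== SOURCE A (Python) =====
-- from typing import List, Dict, Any, Optional
--
-- def generate_fix_recommendations(causes: List[Dict[str, Any]]) -> List[str]:
--     """
--     Generate fix recommendations from causes.
--
--     Args:
--         causes: List of cause dictionaries
--
--     Returns:
--         List of fix recommendation strings
--     """
--     recommendations = []
--
--     for cause in causes:
--         cause_type = cause.get("type")
--
--         if cause_type == "strategy_interpreter_mapping_error":
--             recommendations.append(
--                 "Fix strategy interpreter: Check desync_method BEFORE fooling parameter "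
--                 "(recon/core/strategy_interpreter.py)"
--             )
--
--         elif cause_type == "autottl_not_implemented":
--             recommendations.append(
--                 "Implement AutoTTL in bypass engine: Add calculate_autottl() support "
--                 "(recon/core/bypass/engine/base_engine.py)"
--             )
--
--         elif cause_type == "parameter_parsing_error":
--             param = cause.get("parameter", "unknown")
--             recommendations.append(
--                 f"Fix {param} parsing in strategy parser " "(recon/core/strategy_parser_v2.py)"
--             )
--
--         elif cause_type == "fooling_parameter_parsing_error":
--             recommendations.append(
--                 "Fix fooling parameter parsing: Ensure multiple fooling methods are parsed correctly "
--                 "(recon/core/strategy_parser_v2.py)"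
--             )
--
--         elif cause_type == "ttl_calculation_error":
--             recommendations.append(
--                 "Fix TTL calculation in packet builder " "(recon/core/bypass/packet/builder.py)"
--             )
--
--         elif cause_type == "tcp_flags_error":
--             recommendations.append(
--                 "Fix TCP flags setting in packet builder "
--                 "(recon/core/bypass/packet/builder.py)"
--             )
--
--         elif cause_type == "payload_segmentation_error":
--             recommendations.append(
--                 "Fix payload segmentation in attack implementation "
--                 "(recon/core/bypass/attacks/)"
--             )
--
--         elif cause_type == "correlated_ttl_issue":
--             recommendations.append(
--                 "Fix TTL handling: Address both strategy parsing and packet building "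
--                 "(strategy_parser_v2.py + bypass/engine/base_engine.py)"
--             )
--
--         elif cause_type == "correlated_fooling_issue":
--             recommendations.append(
--                 "Fix fooling implementation: Address both strategy parsing and attack execution "
--                 "(strategy_parser_v2.py + bypass/attacks/)"
--             )
--
--     return recommendations
-- ===== SOURCE B (Python) =====
-- def _message(cause):
--     """Recommendation for one cause, dispatched by a structural match."""
--     match cause.get("type"):
--         case "strategy_interpreter_mapping_error":
--             return ("Fix strategy interpreter: Check desync_method BEFORE fooling parameter "
--                     "(recon/core/strategy_interpreter.py)")
--         case "autottl_not_implemented":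
--             return ("Implement AutoTTL in bypass engine: Add calculate_autottl() support "
--                     "(recon/core/bypass/engine/base_engine.py)")
--         case "parameter_parsing_error":
--             return (f"Fix {cause.get('parameter', 'unknown')} parsing in strategy parser "
--                     "(recon/core/strategy_parser_v2.py)")
--         case "fooling_parameter_parsing_error":
--             return ("Fix fooling parameter parsing: Ensure multiple fooling methods are parsed correctly "
--                     "(recon/core/strategy_parser_v2.py)")
--         case "ttl_calculation_error":
--             return "Fix TTL calculation in packet builder (recon/core/bypass/packet/builder.py)"
--         case "tcp_flags_error":
--             return "Fix TCP flags setting in packet builder (recon/core/bypass/packet/builder.py)"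
--         case "payload_segmentation_error":
--             return "Fix payload segmentation in attack implementation (recon/core/bypass/attacks/)"
--         case "correlated_ttl_issue":
--             return ("Fix TTL handling: Address both strategy parsing and packet building "
--                     "(strategy_parser_v2.py + bypass/engine/base_engine.py)")
--         case "correlated_fooling_issue":
--             return ("Fix fooling implementation: Address both strategy parsing and attack execution "
--                     "(strategy_parser_v2.py + bypass/attacks/)")
--         case _:
--             return None
--
--
-- def generate_fix_recommendations(causes):
--     """Structural recursion on the cause list: build the result back-to-front by
--     consing the head's recommendation (if any) onto the recursively built tail."""
--     if not causes:
--         return []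
--     head, rest = causes[0], generate_fix_recommendations(causes[1:])
--     m = _message(head)
--     return rest if m is None else [m] + rest
-- ===== Notes on version B (the rewrite author's own statement) =====
-- stated objective: alternative
-- what changed: Replaced A's iterative accumulator loop with an if/elif chain by structural recursion on the cause list that builds the output back-to-front (consing onto the recursively built tail), with per-cause dispatch done by a match statement in a helper.
import Mathlib
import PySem

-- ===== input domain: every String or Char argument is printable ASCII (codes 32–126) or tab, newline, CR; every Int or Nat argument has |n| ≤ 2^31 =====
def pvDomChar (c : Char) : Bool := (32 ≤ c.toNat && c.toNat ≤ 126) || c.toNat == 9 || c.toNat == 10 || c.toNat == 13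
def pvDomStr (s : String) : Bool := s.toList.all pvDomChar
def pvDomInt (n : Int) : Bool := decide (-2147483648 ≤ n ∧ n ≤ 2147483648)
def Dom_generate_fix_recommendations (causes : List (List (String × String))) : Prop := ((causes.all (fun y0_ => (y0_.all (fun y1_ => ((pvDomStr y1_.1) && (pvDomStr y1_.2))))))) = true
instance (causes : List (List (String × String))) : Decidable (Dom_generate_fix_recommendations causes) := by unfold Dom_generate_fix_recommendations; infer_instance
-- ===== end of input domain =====

-- B replaces A's accumulator loop + if/elif chain by structural recursion building the
-- output back-to-front, with per-cause dispatch via a match; objective: alternative.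

-- ===== PORT A =====
-- cause.get(k): first match in the association list (dicts have unique keys)
def pvGetA? (cause : List (String × String)) (k : String) : Option String :=
  (cause.find? (fun p => p.1 == k)).map (·.2)

def pvStepA (acc : List String) (cause : List (String × String)) : List String :=
  let ct := pvGetA? cause "type"
  if ct = some "strategy_interpreter_mapping_error" then
    acc ++ ["Fix strategy interpreter: Check desync_method BEFORE fooling parameter (recon/core/strategy_interpreter.py)"]
  else if ct = some "autottl_not_implemented" then
    acc ++ ["Implement AutoTTL in bypass engine: Add calculate_autottl() support (recon/core/bypass/engine/base_engine.py)"]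
  else if ct = some "parameter_parsing_error" then
    let param := (pvGetA? cause "parameter").getD "unknown"
    acc ++ ["Fix " ++ param ++ " parsing in strategy parser (recon/core/strategy_parser_v2.py)"]
  else if ct = some "fooling_parameter_parsing_error" then
    acc ++ ["Fix fooling parameter parsing: Ensure multiple fooling methods are parsed correctly (recon/core/strategy_parser_v2.py)"]
  else if ct = some "ttl_calculation_error" then
    acc ++ ["Fix TTL calculation in packet builder (recon/core/bypass/packet/builder.py)"]
  else if ct = some "tcp_flags_error" then
    acc ++ ["Fix TCP flags setting in packet builder (recon/core/bypass/packet/builder.py)"]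
  else if ct = some "payload_segmentation_error" then
    acc ++ ["Fix payload segmentation in attack implementation (recon/core/bypass/attacks/)"]
  else if ct = some "correlated_ttl_issue" then
    acc ++ ["Fix TTL handling: Address both strategy parsing and packet building (strategy_parser_v2.py + bypass/engine/base_engine.py)"]
  else if ct = some "correlated_fooling_issue" then
    acc ++ ["Fix fooling implementation: Address both strategy parsing and attack execution (strategy_parser_v2.py + bypass/attacks/)"]
  else acc

def generate_fix_recommendations (causes : List (List (String × String))) : List String :=
  causes.foldl pvStepA []

-- ===== PORT B =====
def pvGetB? (cause : List (String × String)) (k : String) : Option String :=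
  (cause.find? (fun p => p.1 == k)).map (·.2)

-- Source B's _message: match cases tried in order = sequential comparison chain
def pvMessageB (cause : List (String × String)) : Option String :=
  let t := pvGetB? cause "type"
  if t = some "strategy_interpreter_mapping_error" then
    some "Fix strategy interpreter: Check desync_method BEFORE fooling parameter (recon/core/strategy_interpreter.py)"
  else if t = some "autottl_not_implemented" then
    some "Implement AutoTTL in bypass engine: Add calculate_autottl() support (recon/core/bypass/engine/base_engine.py)"
  else if t = some "parameter_parsing_error" then
    some ("Fix " ++ (pvGetB? cause "parameter").getD "unknown" ++ " parsing in strategy parser (recon/core/strategy_parser_v2.py)")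
  else if t = some "fooling_parameter_parsing_error" then
    some "Fix fooling parameter parsing: Ensure multiple fooling methods are parsed correctly (recon/core/strategy_parser_v2.py)"
  else if t = some "ttl_calculation_error" then
    some "Fix TTL calculation in packet builder (recon/core/bypass/packet/builder.py)"
  else if t = some "tcp_flags_error" then
    some "Fix TCP flags setting in packet builder (recon/core/bypass/packet/builder.py)"
  else if t = some "payload_segmentation_error" then
    some "Fix payload segmentation in attack implementation (recon/core/bypass/attacks/)"
  else if t = some "correlated_ttl_issue" then
    some "Fix TTL handling: Address both strategy parsing and packet building (strategy_parser_v2.py + bypass/engine/base_engine.py)"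
  else if t = some "correlated_fooling_issue" then
    some "Fix fooling implementation: Address both strategy parsing and attack execution (strategy_parser_v2.py + bypass/attacks/)"
  else none

-- Source B's generate_fix_recommendations: structural recursion, consing onto the tail
def generate_fix_recommendations_alt : List (List (String × String)) → List String
  | [] => []
  | head :: tail =>
    let rest := generate_fix_recommendations_alt tail
    match pvMessageB head with
    | none => rest
    | some m => m :: rest

-- ===== PRECONDITION & SPEC =====
def Spec_generate_fix_recommendations (causes : List (List (String × String))) (out : List String) : Prop := out = generate_fix_recommendations_alt causes
instance (causes : List (List (String × String))) (out : List String) : Decidable (Spec_generate_fix_recommendations causes out) := by unfold Spec_generate_fix_recommendations; infer_instance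

-- ===== CLAIM (what is proved, stated in full; the proofs are below) =====
def Claim_equal_generate_fix_recommendations : Prop := ∀ (causes : List (List (String × String))), Dom_generate_fix_recommendations causes → Spec_generate_fix_recommendations causes (generate_fix_recommendations causes)

-- ===== LEMMAS AND PROOFS =====

-- one step of A appends exactly B's per-cause message (if any)
theorem pvStepA_eq (acc : List String) (cause : List (String × String)) :
    pvStepA acc cause = acc ++ (pvMessageB cause).toList := by
  have hg : pvGetB? cause "type" = pvGetA? cause "type" := rfl
  have hp : pvGetB? cause "parameter" = pvGetA? cause "parameter" := rfl
  unfold pvStepA pvMessageB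
  simp only [hg, hp]
  split_ifs <;> first | rfl | exact (List.append_nil acc).symm

-- A's fold with any accumulator equals that accumulator followed by B's recursion
theorem pvFoldA_eq (causes : List (List (String × String))) (acc : List String) :
    causes.foldl pvStepA acc = acc ++ generate_fix_recommendations_alt causes := by
  induction causes generalizing acc with
  | nil => simp [generate_fix_recommendations_alt]
  | cons c cs ih =>
    simp only [List.foldl_cons, ih, pvStepA_eq, generate_fix_recommendations_alt]
    cases pvMessageB c <;> simp

-- ===== VERDICT (by name: the statement is the Claim_ definition above) =====
theorem generate_fix_recommendations_spec : Claim_equal_generate_fix_recommendations := by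
  intro causes _
  unfold Spec_generate_fix_recommendations generate_fix_recommendations
  simpa using pvFoldA_eq causes []
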